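-- pv_equiv track=rewrite | github.com/DodeBogdan/Retele---Facultate | Paritate bi-dimensionala.py | transform_column
-- ===== SOURCE A (Python) =====
-- def transform_column(matrix):
--     string = ''
--     new_matrix = matrix
--     for index in range(len(matrix[0])):
--         numberOfOne = 0
--         for word in matrix:
--             if word[index] is '1':
--                 numberOfOne += 1
--         string += str(numberOfOne % 2)
--     new_matrix.append(string)
--     return new_matrix
-- ===== SOURCE B (Python) =====
-- def transform_column(matrix):
--     # Row-major single pass maintaining a per-column parity vector,
--     # instead of A's column-outer / row-inner counting.  Mutates and
--     # returns the same list object, like A.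
--     width = len(matrix[0])
--     parity = [0] * width
--     for row in matrix:
--         parity = [(parity[i] + (row[i] == '1')) % 2 for i in range(width)]
--     matrix.append(''.join(str(p) for p in parity))
--     return matrix
-- ===== Notes on version B (the rewrite author's own statement) =====
-- stated objective: alternative
-- what changed: A scans the matrix once per column (column-outer, row-inner count of '1's); B makes a single row-major pass keeping a parity vector for all columns at once, then joins it.
import Mathlib
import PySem

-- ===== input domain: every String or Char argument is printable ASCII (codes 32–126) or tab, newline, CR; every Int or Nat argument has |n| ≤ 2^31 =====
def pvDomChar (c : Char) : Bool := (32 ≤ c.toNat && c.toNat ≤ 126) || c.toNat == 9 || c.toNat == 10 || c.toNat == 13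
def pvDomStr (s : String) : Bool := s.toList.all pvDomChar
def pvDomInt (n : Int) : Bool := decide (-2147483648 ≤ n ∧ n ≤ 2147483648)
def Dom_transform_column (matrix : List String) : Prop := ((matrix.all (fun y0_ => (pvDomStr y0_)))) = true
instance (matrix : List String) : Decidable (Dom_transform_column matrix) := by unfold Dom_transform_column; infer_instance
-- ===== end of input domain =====

-- B replaces A's column-outer/row-inner counting by one row-major pass over a per-column
-- parity vector (alternative algorithm, same cost).  Both A and B mutate the argument list
-- in place (append the parity string); the equivalence proved here is about the return value.


-- ===== PORT A =====
-- for index in range(len(matrix[0])): count '1's down column index; string += str(count % 2)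
def transform_column (matrix : List String) : List String :=
  let w : Nat := (matrix.headD "").toList.length
  let s : List Char :=
    (PySem.List.pyRange 0 (w : Int) 1).foldl (fun acc index =>
      let numberOfOne : Int :=
        matrix.foldl (fun c word =>
          if PySem.Str.pyGet? word index = some '1' then c + 1 else c) 0
      acc ++ PySem.Int.toChars (PySem.Int.mod numberOfOne 2)) []
  matrix ++ [String.ofList s]

-- ===== PORT B =====
-- parity = [0]*width; one pass over rows updating every column's parity; join at the end
def transform_column_alt (matrix : List String) : List String :=
  let width : Nat := (matrix.headD "").toList.length
  let parity0 : List Int := List.replicate width 0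
  let parity : List Int :=
    matrix.foldl (fun par row =>
      (PySem.List.pyRange 0 (width : Int) 1).map (fun i =>
        PySem.Int.mod (PySem.List.pyGetD par i 0 +
          (if PySem.Str.pyGet? row i = some '1' then 1 else 0)) 2)) parity0
  let s : List Char := parity.foldl (fun acc p => acc ++ PySem.Int.toChars p) []
  matrix ++ [String.ofList s]

-- ===== PRECONDITION & SPEC =====
-- Pre_ excludes exactly the inputs where the Python A raises IndexError: the empty matrix
-- (matrix[0]) and matrices with a row shorter than the first row (word[index]).
def Pre_transform_column (matrix : List String) : Prop :=
  matrix ≠ [] ∧ ∀ row ∈ matrix, (matrix.headD "").toList.length ≤ row.toList.length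
instance (matrix : List String) : Decidable (Pre_transform_column matrix) := by
  unfold Pre_transform_column; infer_instance
def pvWitness_transform_column : List String := ["10", "01"]

def Spec_transform_column (matrix : List String) (out : List String) : Prop := out = transform_column_alt matrix
instance (matrix : List String) (out : List String) : Decidable (Spec_transform_column matrix out) := by unfold Spec_transform_column; infer_instance

-- ===== CLAIM (what is proved, stated in full; the proofs are below) =====
def Claim_equal_transform_column : Prop := ∀ (matrix : List String), Dom_transform_column matrix → Pre_transform_column matrix → Spec_transform_column matrix (transform_column matrix)

-- ===== LEMMAS AND PROOFS =====

-- count of '1's at column i over the rows of ms (A's inner loop)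
def pvCnt (ms : List String) (i : Int) : Int :=
  ms.foldl (fun c word => if PySem.Str.pyGet? word i = some '1' then c + 1 else c) 0

theorem pvCnt_shift (ms : List String) (i : Int) (c : Int) :
    ms.foldl (fun c word => if PySem.Str.pyGet? word i = some '1' then c + 1 else c) c
      = c + ms.foldl (fun c word => if PySem.Str.pyGet? word i = some '1' then c + 1 else c) 0 := by
  induction ms generalizing c with
  | nil => simp only [List.foldl_nil]; ring
  | cons r rest ih =>
    rw [List.foldl_cons, List.foldl_cons]
    split_ifs
    · rw [ih (c + 1), ih (0 + 1)]; ring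
    · rw [ih c]

theorem pvMod_mod_add (a b : Int) :
    PySem.Int.mod (PySem.Int.mod a 2 + b) 2 = PySem.Int.mod (a + b) 2 := by
  simp only [PySem.Int.mod_eq_emod_of_pos (show (0:Int) < 2 by omega)]
  omega

-- invariant of B's row loop: after folding ms, column i holds (f i + count of ms at i) % 2
theorem pvB_inv (ms : List String) (w : Nat) (f : Int → Int) :
    ms.foldl (fun par row =>
        (PySem.List.pyRange 0 (w : Int) 1).map (fun i =>
          PySem.Int.mod (PySem.List.pyGetD par i 0 +
            (if PySem.Str.pyGet? row i = some '1' then 1 else 0)) 2))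
      ((PySem.List.pyRange 0 (w : Int) 1).map (fun i => PySem.Int.mod (f i) 2))
    = (PySem.List.pyRange 0 (w : Int) 1).map (fun i => PySem.Int.mod (f i + pvCnt ms i) 2) := by
  induction ms generalizing f with
  | nil => simp [pvCnt]
  | cons r rest ih =>
    simp only [List.foldl_cons]
    have hstep :
        (PySem.List.pyRange 0 (w : Int) 1).map (fun i =>
          PySem.Int.mod (PySem.List.pyGetD
              ((PySem.List.pyRange 0 (w : Int) 1).map (fun i => PySem.Int.mod (f i) 2)) i 0 +
            (if PySem.Str.pyGet? r i = some '1' then 1 else 0)) 2)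
        = (PySem.List.pyRange 0 (w : Int) 1).map (fun i =>
            PySem.Int.mod ((fun j => f j + (if PySem.Str.pyGet? r j = some '1' then 1 else 0)) i) 2) := by
      apply List.map_congr_left
      intro i hi
      have hb := (PySem.List.mem_pyRange_one).1 hi
      rw [PySem.List.pyGetD_map_pyRange_of_nonneg _ _ _ _ hb.1 hb.2, pvMod_mod_add]
    rw [hstep, ih]
    apply List.map_congr_left
    intro i _
    have hc : pvCnt (r :: rest) i
        = (if PySem.Str.pyGet? r i = some '1' then 1 else 0) + pvCnt rest i := by
      unfold pvCnt
      rw [List.foldl_cons]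
      split_ifs
      · rw [pvCnt_shift rest i (0 + 1)]; ring
      · rw [zero_add]
    rw [hc]; ring_nf

theorem pvReplicate_eq (w : Nat) :
    (List.replicate w (0 : Int))
      = (PySem.List.pyRange 0 (w : Int) 1).map (fun i => PySem.Int.mod ((fun _ => (0:Int)) i) 2) := by
  have hm : PySem.Int.mod (0 : Int) 2 = 0 := by decide
  simp only [hm]
  rw [List.map_const']
  congr 1
  rw [PySem.List.length_pyRange_one]
  omega

-- ===== VERDICT (by name: the statement is the Claim_ definition above) =====
theorem transform_column_spec : Claim_equal_transform_column := by
  intro matrix _ _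
  show transform_column matrix = transform_column_alt matrix
  unfold transform_column transform_column_alt
  simp only []
  congr 1
  congr 1
  rw [pvReplicate_eq, pvB_inv, List.foldl_map]
  simp only [zero_add]
  rfl
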